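-- pv_equiv track=rewrite | github.com/SleepyCloud023/coding-test-study-note | GraphTraversal/boj_1697/boj_1697.py | bfs
-- ===== SOURCE A (Python) =====
-- from collections import deque
--
-- def get_next_node(node: int, mode: int):
--     if mode == 0:
--         return node - 1
--     elif mode == 1:
--         return node + 1
--     else:
--         return node * 2
--
-- def bfs(src, dst):
--     dist = [0] * 400001
--     dist[src] = 1
--
--     bfs_q = deque([src])
--     while(bfs_q):
--         cur_node = bfs_q.popleft()
--
--         for mode in range(3):
--             next_node = get_next_node(cur_node, mode)
--
--             if not 0 <= next_node <= 400000:
--                 continue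
--
--             if dist[next_node] == 0:
--                 dist[next_node] = dist[cur_node] + 1
--                 bfs_q.append(next_node)
--
--             if next_node == dst:
--                 return dist[next_node]
-- ===== SOURCE B (Python) =====
-- def bfs(src, dst):
--     # Greedy/divide-and-conquer backward from dst (halve when possible, walk otherwise)
--     # instead of a BFS over the whole 400001-cell board.
--     # Off-board positions are unreachable: return None (A's BFS also yields None there,
--     # except for the accidental negative-index start src == -1).
--     if src < 0 or src > 400000 or dst < 0 or dst > 400000:
--         return None
--     return _min_moves(src, dst) + 1
--
--
-- def _min_moves(src, dst):
--     # Fewest moves among -1, +1, *2 from src to dst (0 <= src; the extra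
--     # 'dst <= 0' disjunct only makes the recursion well-founded for any arguments).
--     if dst <= src or dst <= 0:
--         return src - dst
--     if dst % 2 == 0:
--         return min(dst - src, 1 + _min_moves(src, dst // 2))
--     if dst == 1:
--         return 1
--     return min(dst - src,
--                2 + _min_moves(src, (dst - 1) // 2),
--                2 + _min_moves(src, (dst + 1) // 2))
-- ===== Notes on version B (the rewrite author's own statement) =====
-- stated objective: faster
-- what changed: Replaces the breadth-first search over the whole 400001-cell dist array (A allocates and explores the board on every call) by a logarithmic divide-and-conquer working backward from dst: when dst is above src it halves dst (stepping to dst-1/dst+1 first when dst is odd) and otherwise walks linearly, taking the minimum of the walk and the halving route.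
-- intended difference: For src = -1 with 0 <= dst <= 400000, A silently starts the BFS off the board (dist[-1] marks cell 400000 by Python negative-index wraparound) and returns an accidental shifted count (e.g. 2 for dst=0, 1 for dst=400000); B returns None, the intended result for an off-board start position. — e.g. on bfs(-1, 0): A returns some 2, B returns none
import Mathlib
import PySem

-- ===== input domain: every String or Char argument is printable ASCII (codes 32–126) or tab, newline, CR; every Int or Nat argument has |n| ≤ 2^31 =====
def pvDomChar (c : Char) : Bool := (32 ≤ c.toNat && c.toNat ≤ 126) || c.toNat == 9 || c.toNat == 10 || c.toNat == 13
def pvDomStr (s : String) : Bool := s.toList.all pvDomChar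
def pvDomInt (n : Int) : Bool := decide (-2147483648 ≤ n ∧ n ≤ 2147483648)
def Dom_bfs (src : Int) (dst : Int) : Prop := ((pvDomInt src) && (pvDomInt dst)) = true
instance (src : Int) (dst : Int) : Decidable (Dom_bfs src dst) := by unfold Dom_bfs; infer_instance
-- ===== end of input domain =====

-- B replaces A's breadth-first search over the fixed 400001-cell board by a logarithmic
-- backward divide-and-conquer on dst (objective: faster; measured).


-- ===== PORT A =====
def getNextNode (node : Int) (mode : Int) : Int :=
  if mode == 0 then node - 1 else if mode == 1 then node + 1 else node * 2

-- Python list index on the length-400001 list `dist`: a negative index counts from the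
-- end; exact for -400001 ≤ i ≤ 400000 (outside, Python raises IndexError — excluded by Pre_).
def pyIdxA (i : Int) : Nat := (if i < 0 then i + 400001 else i).toNat

-- the `for mode in range(3)` body; `.error r` is the `return dist[next_node]` early exit.
-- The deque is kept as front/back lists (appends are conses onto `back`).
def bfsModes (dst cur : Int) : List Int → Array Int × List Int → Except Int (Array Int × List Int)
  | [], s => .ok s
  | m :: ms, (dist, back) =>
    let next := getNextNode cur m
    if ¬ (0 ≤ next ∧ next ≤ 400000) then bfsModes dst cur ms (dist, back)
    else
      let s' := if dist.getD (pyIdxA next) 0 == 0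
        then (dist.setIfInBounds (pyIdxA next) (dist.getD (pyIdxA cur) 0 + 1), next :: back)
        else (dist, back)
      if next == dst then .error (s'.1.getD (pyIdxA next) 0)
      else bfsModes dst cur ms s'

-- the `while bfs_q:` loop; fuel only makes the recursion total (800005 is proved sufficient:
-- each iteration strictly decreases 2·(number of zero cells) + queue length ≤ 800003).
def bfsLoop (dst : Int) : Nat → Array Int → List Int → List Int → Option Int
  | 0, _, _, _ => none
  | fuel+1, dist, front, back =>
    match front with
    | cur :: f =>
      (match bfsModes dst cur [0, 1, 2] (dist, back) with
       | .error r => some r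
       | .ok (dist', b') => bfsLoop dst fuel dist' f b')
    | [] =>
      match back.reverse with
      | [] => none
      | cur :: f =>
        (match bfsModes dst cur [0, 1, 2] (dist, []) with
         | .error r => some r
         | .ok (dist', b') => bfsLoop dst fuel dist' f b')

-- `dist = [0] * 400001; dist[src] = 1` (Python list assignment, O(1) in place, as Array)
def bfs (src : Int) (dst : Int) : Option Int :=
  let dist := (Array.replicate 400001 (0:Int)).setIfInBounds (pyIdxA src) 1
  bfsLoop dst 800005 dist [src] []

-- ===== PORT B =====
def minMoves (src : Int) (dst : Int) : Int :=
  if dst ≤ src ∨ dst ≤ 0 then src - dst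
  else if PySem.Int.mod dst 2 == 0 then
    min (dst - src) (1 + minMoves src (PySem.Int.floordiv dst 2))
  else if dst == 1 then 1
  else
    min (dst - src)
      (min (2 + minMoves src (PySem.Int.floordiv (dst - 1) 2))
           (2 + minMoves src (PySem.Int.floordiv (dst + 1) 2)))
termination_by dst.toNat
decreasing_by
  all_goals
    simp only [PySem.Int.floordiv_eq_ediv_of_pos (by norm_num : (0:Int) < 2),
      beq_iff_eq] at *
    omega

def bfs_alt (src : Int) (dst : Int) : Option Int :=
  if src < 0 ∨ 400000 < src ∨ dst < 0 ∨ 400000 < dst then none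
  else some (minMoves src dst + 1)

-- ===== PRECONDITION & SPEC =====
-- A raises IndexError (dist[src] out of range) exactly when src < -400001 or src > 400000;
-- Pre_ admits every input on which A returns.
def Pre_bfs (src : Int) (dst : Int) : Prop := -400001 ≤ src ∧ src ≤ 400000
instance (src : Int) (dst : Int) : Decidable (Pre_bfs src dst) := by unfold Pre_bfs; infer_instance
def pvWitness_bfs : Int × Int := (5, 17)

-- For src = -1 with 0 ≤ dst ≤ 400000, A silently starts the BFS off the board (dist[-1]
-- marks cell 400000 by Python negative-index wraparound) and returns an accidental shifted
-- count (e.g. 2 for dst = 0, 1 for dst = 400000); B returns None, the intended result for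
-- an off-board start position.
def D_bfs (src : Int) (dst : Int) : Prop := src = -1 ∧ 0 ≤ dst ∧ dst ≤ 400000
instance (src : Int) (dst : Int) : Decidable (D_bfs src dst) := by unfold D_bfs; infer_instance

def Spec_bfs (src : Int) (dst : Int) (out : Option Int) : Prop := ¬ D_bfs src dst → out = bfs_alt src dst
instance (src : Int) (dst : Int) (out : Option Int) : Decidable (Spec_bfs src dst out) := by unfold Spec_bfs; infer_instance

def pvDiffWitness_bfs : Int × Int := (-1, 0)
def pvDiffWitnessOut_bfs : (Option Int) × (Option Int) := (some 2, none)

-- ===== CLAIM (what is proved, stated in full; the proofs are below) =====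
def Claim_unchanged_bfs : Prop := ∀ (src : Int) (dst : Int), Dom_bfs src dst → Pre_bfs src dst → Spec_bfs src dst (bfs src dst)
def Claim_exact_bfs : Prop := ∀ (src : Int) (dst : Int), Dom_bfs src dst → Pre_bfs src dst → D_bfs src dst → bfs src dst ≠ bfs_alt src dst
def Claim_changed_bfs : Prop := Dom_bfs (pvDiffWitness_bfs.1) (pvDiffWitness_bfs.2) ∧ Pre_bfs (pvDiffWitness_bfs.1) (pvDiffWitness_bfs.2) ∧ D_bfs (pvDiffWitness_bfs.1) (pvDiffWitness_bfs.2) ∧ bfs (pvDiffWitness_bfs.1) (pvDiffWitness_bfs.2) = pvDiffWitnessOut_bfs.1 ∧ bfs_alt (pvDiffWitness_bfs.1) (pvDiffWitness_bfs.2) = pvDiffWitnessOut_bfs.2 ∧ pvDiffWitnessOut_bfs.1 ≠ pvDiffWitnessOut_bfs.2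

-- ===== LEMMAS AND PROOFS =====

-- ---- the mathematical shortest-move count on the board [0, 400000] ----

def inR (x : Int) : Prop := 0 ≤ x ∧ x ≤ 400000

def nbr (x y : Int) : Prop := (y = x - 1 ∨ y = x + 1 ∨ y = 2 * x) ∧ 0 ≤ y ∧ y ≤ 400000

inductive PathN (src : Int) : Nat → Int → Prop
  | zero : PathN src 0 src
  | snoc {n z y} : PathN src n z → nbr z y → PathN src (n+1) y

noncomputable def sp (src y : Int) : Nat := sInf {n | PathN src n y}

theorem pathN_target {src : Int} {n : Nat} {y : Int} (h : PathN src n y) :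
    (n = 0 ∧ y = src) ∨ inR y := by
  cases h with
  | zero => exact Or.inl ⟨rfl, rfl⟩
  | snoc p e => exact Or.inr ⟨e.2.1, e.2.2⟩

theorem walk_up (src : Int) (h0 : 0 ≤ src) : ∀ k : Nat, src + k ≤ 400000 →
    PathN src k (src + k) := by
  intro k
  induction k with
  | zero => intro _; simpa using PathN.zero
  | succ k ih =>
    intro hk
    have : PathN src k (src + k) := ih (by push_cast at hk ⊢; omega)
    have e : nbr (src + k) (src + (k+1)) := by
      refine ⟨Or.inr (Or.inl ?_), ?_, ?_⟩ <;> (push_cast at hk ⊢; omega)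
    exact PathN.snoc this e

theorem walk_down (src : Int) (hs : src ≤ 400000) : ∀ k : Nat, 0 ≤ src - k →
    PathN src k (src - k) := by
  intro k
  induction k with
  | zero => intro _; simpa using PathN.zero
  | succ k ih =>
    intro hk
    have : PathN src k (src - k) := ih (by push_cast at hk ⊢; omega)
    have e : nbr (src - k) (src - (k+1)) := by
      refine ⟨Or.inl ?_, ?_, ?_⟩ <;> (push_cast at hk ⊢; omega)
    exact PathN.snoc this e

theorem reach {src y : Int} (hs : inR src) (hy : inR y) : ∃ n, PathN src n y := by
  obtain ⟨hs1, hs2⟩ := hs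
  obtain ⟨hy1, hy2⟩ := hy
  rcases le_total src y with h | h
  · exact ⟨(y - src).toNat, by
      have := walk_up src hs1 (y - src).toNat (by omega)
      rwa [show src + ((y - src).toNat : Int) = y by omega] at this⟩
  · exact ⟨(src - y).toNat, by
      have := walk_down src hs2 (src - y).toNat (by omega)
      rwa [show src - ((src - y).toNat : Int) = y by omega] at this⟩

theorem sp_le {src : Int} {n : Nat} {y : Int} (h : PathN src n y) : sp src y ≤ n :=
  Nat.sInf_le h

theorem sp_path {src y : Int} (h : ∃ n, PathN src n y) : PathN src (sp src y) y :=
  Nat.sInf_mem h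

theorem sp_self (src : Int) : sp src src = 0 :=
  Nat.le_zero.mp (sp_le PathN.zero)

theorem sp_eq_zero {src y : Int} (h : ∃ n, PathN src n y) (h0 : sp src y = 0) : y = src := by
  have := sp_path h
  rw [h0] at this
  cases this; rfl

theorem sp_edge {src x y : Int} (hx : ∃ n, PathN src n x) (e : nbr x y) :
    sp src y ≤ sp src x + 1 :=
  sp_le (PathN.snoc (sp_path hx) e)

theorem penult {src y : Int} {k : Nat} (hy : ∃ n, PathN src n y) (h : sp src y = k + 1) :
    ∃ z, nbr z y ∧ sp src z = k ∧ (z = src ∨ inR z) := by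
  have hp := sp_path hy
  rw [h] at hp
  cases hp with
  | snoc p e =>
    rename_i z
    refine ⟨z, e, ?_, ?_⟩
    · have h1 : sp src z ≤ k := sp_le p
      have h2 : sp src y ≤ sp src z + 1 := sp_edge ⟨_, p⟩ e
      omega
    · rcases pathN_target p with ⟨_, h⟩ | h
      · exact Or.inl h
      · exact Or.inr h

theorem level_pred {src : Int} (hs : inR src) {m : Nat}
    (h : ∃ x, inR x ∧ sp src x = m + 1) : ∃ z, (z = src ∨ inR z) ∧ sp src z = m := by
  obtain ⟨x, hx, hsp⟩ := h
  obtain ⟨z, _, hzm, hz⟩ := penult (reach hs hx) hsp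
  exact ⟨z, hz, hzm⟩

theorem level_down {src : Int} (hs : inR src) :
    ∀ (j k : Nat), 1 ≤ k → (∃ x, inR x ∧ sp src x = k + j) → ∃ z, inR z ∧ sp src z = k := by
  intro j
  induction j with
  | zero => intro k _ h; simpa using h
  | succ j ihj =>
    intro k hk h
    obtain ⟨z, hz, hsp⟩ := level_pred hs (m := k + j) (by
      obtain ⟨x, hx, hs'⟩ := h
      exact ⟨x, hx, by omega⟩)
    rcases hz with rfl | hz
    · rw [sp_self] at hsp; omega
    · exact ihj k hk ⟨z, hz, hsp⟩

-- ---- B-side: minMoves computes the shortest-move count ----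

theorem minMoves_nonneg {src : Int} (h0 : 0 ≤ src) : ∀ dst, 0 ≤ minMoves src dst := by
  intro dst
  fun_induction minMoves src dst with
  | case1 dst h => omega
  | case2 dst h he ih => omega
  | case3 dst h he h1 => omega
  | case4 dst h he h1 ih1 ih2 => omega

theorem mm_base {src dst : Int} (h : dst ≤ src ∨ dst ≤ 0) : minMoves src dst = src - dst := by
  rw [minMoves]; simp [h]

theorem mm_even {src dst : Int} (h1 : src < dst) (h2 : 0 < dst) (h3 : dst % 2 = 0) :
    minMoves src dst = min (dst - src) (1 + minMoves src (dst / 2)) := by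
  rw [minMoves]
  simp only [PySem.Int.floordiv_eq_ediv_of_pos (by norm_num : (0:Int) < 2),
    PySem.Int.mod_eq_emod_of_pos (by norm_num : (0:Int) < 2), beq_iff_eq, h3]
  rw [if_neg (by omega), if_pos trivial]

theorem mm_one {src : Int} (h : src ≤ 0) : minMoves src 1 = 1 := by
  rw [minMoves]
  simp only [PySem.Int.mod_eq_emod_of_pos (by norm_num : (0:Int) < 2), beq_iff_eq]
  rw [if_neg (by omega)]
  norm_num

theorem mm_odd {src dst : Int} (h0 : 0 < dst) (h1 : src < dst) (h2 : dst % 2 = 1) (h3 : dst ≠ 1) :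
    minMoves src dst = min (dst - src)
      (min (2 + minMoves src ((dst - 1) / 2)) (2 + minMoves src ((dst + 1) / 2))) := by
  rw [minMoves]
  simp only [PySem.Int.floordiv_eq_ediv_of_pos (by norm_num : (0:Int) < 2),
    PySem.Int.mod_eq_emod_of_pos (by norm_num : (0:Int) < 2), beq_iff_eq, h2]
  rw [if_neg (by omega), if_neg (by norm_num), if_neg h3]

theorem minMoves_lip {src : Int} (h0 : 0 ≤ src) :
    ∀ (n : Nat) (d : Int), 0 ≤ d → d.toNat = n →
      minMoves src (d+1) ≤ minMoves src d + 1 ∧ minMoves src d ≤ minMoves src (d+1) + 1 := by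
  intro n
  induction n using Nat.strong_induction_on with
  | _ n ih =>
    intro d hd hdn
    by_cases hc1 : d + 1 ≤ src
    · rw [mm_base (Or.inl hc1), mm_base (Or.inl (by omega))]; omega
    by_cases hc2 : d ≤ src
    · -- src = d
      have hsd : src = d := by omega
      have hb : minMoves src d = 0 := by rw [mm_base (Or.inl hc2)]; omega
      have hnn : 0 ≤ minMoves src (d+1) := minMoves_nonneg h0 _
      have hub : minMoves src (d+1) ≤ 1 := by
        rcases Int.emod_two_eq (d+1) with hp | hp
        · rw [mm_even (by omega) (by omega) hp]; omega
        · by_cases h1 : d + 1 = 1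
          · rw [h1, mm_one (by omega)]
          · rw [mm_odd (by omega) (by omega) hp h1]; omega
      omega
    · -- src < d
      have hd1 : 1 ≤ d := by omega
      rcases Int.emod_two_eq d with hp | hp
      · -- d even, d+1 odd ≥ 3
        have hde : 2 ≤ d := by omega
        have e1 : minMoves src d = min (d - src) (1 + minMoves src (d / 2)) :=
          mm_even (by omega) (by omega) hp
        have e2 : minMoves src (d+1) = min (d + 1 - src)
            (min (2 + minMoves src ((d+1-1) / 2)) (2 + minMoves src ((d+1+1) / 2))) :=
          mm_odd (by omega) (by omega) (by omega) (by omega)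
        have r1 : (d+1-1) / 2 = d / 2 := by omega
        have r2 : (d+1+1) / 2 = d / 2 + 1 := by omega
        rw [r1, r2] at e2
        have hIH := ih (d/2).toNat (by omega) (d/2) (by omega) rfl
        omega
      · -- d odd
        by_cases h1 : d = 1
        · have hs0 : src = 0 := by omega
          subst h1 hs0
          have e1 : minMoves 0 1 = 1 := mm_one le_rfl
          have e2 : minMoves 0 2 = min 2 (1 + minMoves 0 (2/2)) :=
            mm_even (by omega) (by omega) (by omega)
          have r : (2:Int)/2 = 1 := by norm_num
          rw [r, e1] at e2
          have e3 : minMoves 0 (1+1) = minMoves 0 2 := by norm_num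
          omega
        · have hd3 : 3 ≤ d := by omega
          have e1 : minMoves src d = min (d - src)
              (min (2 + minMoves src ((d-1) / 2)) (2 + minMoves src ((d+1) / 2))) :=
            mm_odd (by omega) (by omega) hp h1
          have e2 : minMoves src (d+1) = min (d + 1 - src) (1 + minMoves src ((d+1) / 2)) :=
            mm_even (by omega) (by omega) (by omega)
          have r : (d+1) / 2 = (d-1) / 2 + 1 := by omega
          rw [r] at e1 e2
          have hIH := ih ((d-1)/2).toNat (by omega) ((d-1)/2) (by omega) rfl
          omega

theorem minMoves_half {src : Int} (h0 : 0 ≤ src) (z : Int) (hz : 0 ≤ z) :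
    minMoves src (2*z) ≤ minMoves src z + 1 := by
  by_cases hb : 2*z ≤ src ∨ 2*z ≤ 0
  · have hz' : z ≤ src ∨ z ≤ 0 := by omega
    rw [mm_base hb, mm_base hz']
    omega
  · have e := mm_even (src := src) (dst := 2*z) (by omega) (by omega) (by omega)
    rw [show 2*z/2 = z by omega] at e
    rw [e]
    omega

theorem minMoves_le_path {src : Int} (h0 : 0 ≤ src) {n : Nat} {y : Int}
    (h : PathN src n y) : minMoves src y ≤ n := by
  induction h with
  | zero => rw [mm_base (Or.inl le_rfl)]; omega
  | snoc p e ih =>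
    rename_i m z y'
    have hz : 0 ≤ z := by
      rcases pathN_target p with ⟨_, rfl⟩ | hzR
      · exact h0
      · exact hzR.1
    obtain ⟨hcase, hy1, hy2⟩ := e
    rcases hcase with h1 | h1 | h1
    · -- y' = z - 1, i.e. z = y' + 1
      have := (minMoves_lip h0 y'.toNat y' hy1 rfl).2
      rw [show y' + 1 = z by omega] at this
      omega
    · -- y' = z + 1
      have := (minMoves_lip h0 z.toNat z hz rfl).1
      rw [show z + 1 = y' by omega] at this
      omega
    · -- y' = 2 * z
      have := minMoves_half h0 z hz
      rw [show 2*z = y' by omega] at this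
      omega

theorem minMoves_path {src : Int} (hs : inR src) :
    ∀ (n : Nat) (d : Int), inR d → d.toNat = n → PathN src (minMoves src d).toNat d := by
  intro n
  induction n using Nat.strong_induction_on with
  | _ n ih =>
    intro d hdR hdn
    obtain ⟨hd0, hd4⟩ := hdR
    have hs1 := hs.1
    by_cases hb : d ≤ src ∨ d ≤ 0
    · have hds : d ≤ src := by omega
      rw [mm_base hb]
      have := walk_down src hs.2 (src - d).toNat (by omega)
      rwa [show src - ((src - d).toNat : Int) = d by omega] at this
    · have hlt : src < d := by omega
      have hd1 : 1 ≤ d := by omega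
      rcases Int.emod_two_eq d with hp | hp
      · -- even
        have e := mm_even hlt (by omega) hp
        rcases min_cases (d - src) (1 + minMoves src (d / 2)) with ⟨hm, _⟩ | ⟨hm, _⟩
        all_goals rw [e, hm]
        · have := walk_up src hs.1 (d - src).toNat (by omega)
          rwa [show src + ((d - src).toNat : Int) = d by omega] at this
        · have hnn : 0 ≤ minMoves src (d/2) := minMoves_nonneg hs.1 _
          have hpath : PathN src (minMoves src (d/2)).toNat (d/2) :=
            ih (d/2).toNat (by omega) (d/2) ⟨by omega, by omega⟩ rfl
          have edge : nbr (d/2) d := ⟨Or.inr (Or.inr (by omega)), by omega, by omega⟩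
          have := PathN.snoc hpath edge
          rwa [show (1 + minMoves src (d/2)).toNat = (minMoves src (d/2)).toNat + 1 by omega]
      · -- odd
        by_cases h1 : d = 1
        · subst h1
          have hs0 : src = 0 := by omega
          subst hs0
          rw [mm_one le_rfl]
          have := walk_up 0 le_rfl 1 (by norm_num)
          simpa using this
        · have e := mm_odd (by omega) hlt hp h1
          have hnnA : 0 ≤ minMoves src ((d-1)/2) := minMoves_nonneg hs.1 _
          have hnnB : 0 ≤ minMoves src ((d+1)/2) := minMoves_nonneg hs.1 _
          have hd40 : d + 1 ≤ 400000 := by omega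
          rcases min_cases (d - src)
              (min (2 + minMoves src ((d-1)/2)) (2 + minMoves src ((d+1)/2))) with
            ⟨hm, _⟩ | ⟨hm, _⟩
          · rw [e, hm]
            have := walk_up src hs.1 (d - src).toNat (by omega)
            rwa [show src + ((d - src).toNat : Int) = d by omega] at this
          · rcases min_cases (2 + minMoves src ((d-1)/2)) (2 + minMoves src ((d+1)/2)) with
              ⟨hm2, _⟩ | ⟨hm2, _⟩
            · rw [e, hm, hm2]
              have hpath : PathN src (minMoves src ((d-1)/2)).toNat ((d-1)/2) :=
                ih ((d-1)/2).toNat (by omega) ((d-1)/2) ⟨by omega, by omega⟩ rfl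
              have e1 : nbr ((d-1)/2) (d-1) := ⟨Or.inr (Or.inr (by omega)), by omega, by omega⟩
              have e2 : nbr (d-1) d := ⟨Or.inr (Or.inl (by omega)), by omega, by omega⟩
              have := PathN.snoc (PathN.snoc hpath e1) e2
              rwa [show (2 + minMoves src ((d-1)/2)).toNat
                  = (minMoves src ((d-1)/2)).toNat + 1 + 1 by omega]
            · rw [e, hm, hm2]
              have hpath : PathN src (minMoves src ((d+1)/2)).toNat ((d+1)/2) :=
                ih ((d+1)/2).toNat (by omega) ((d+1)/2) ⟨by omega, by omega⟩ rfl
              have e1 : nbr ((d+1)/2) (d+1) := ⟨Or.inr (Or.inr (by omega)), by omega, by omega⟩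
              have e2 : nbr (d+1) d := ⟨Or.inl (by omega), by omega, by omega⟩
              have := PathN.snoc (PathN.snoc hpath e1) e2
              rwa [show (2 + minMoves src ((d+1)/2)).toNat
                  = (minMoves src ((d+1)/2)).toNat + 1 + 1 by omega]

theorem minMoves_eq_sp {src dst : Int} (hs : inR src) (hd : inR dst) :
    minMoves src dst = (sp src dst : Int) := by
  have h1 : sp src dst ≤ (minMoves src dst).toNat := sp_le (minMoves_path hs dst.toNat dst hd rfl)
  have h2 : minMoves src dst ≤ (sp src dst : Int) := minMoves_le_path hs.1 (sp_path (reach hs hd))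
  have h3 : 0 ≤ minMoves src dst := minMoves_nonneg hs.1 dst
  omega

-- ---- A-side: the BFS loop returns sp + 1 ----

def dval (dist : Array Int) (x : Int) : Int := dist.getD (pyIdxA x) 0

def ZC (dist : Array Int) : Nat :=
  ((Finset.range 400001).filter (fun i => dist.getD i 0 = 0)).card

theorem pyIdxA_eq {x : Int} (h0 : 0 ≤ x) : pyIdxA x = x.toNat := by
  unfold pyIdxA; rw [if_neg (by omega)]

theorem pyIdxA_lt {x : Int} (h0 : 0 ≤ x) (h4 : x ≤ 400000) : pyIdxA x < 400001 := by
  rw [pyIdxA_eq h0]; omega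

theorem pyIdxA_inj {x y : Int} (hx : inR x) (hy : inR y)
    (h : pyIdxA x = pyIdxA y) : x = y := by
  obtain ⟨hx1, hx2⟩ := hx
  obtain ⟨hy1, hy2⟩ := hy
  rw [pyIdxA_eq hx1, pyIdxA_eq hy1] at h
  omega

theorem getD_set (a : Array Int) (i j : Nat) (v : Int) (hj : j < a.size) :
    (a.setIfInBounds i v).getD j 0 = if i = j then v else a.getD j 0 := by
  simp [Array.getD, Array.size_setIfInBounds, hj, Array.getElem_setIfInBounds]

theorem dval_set {dist : Array Int} (hsz : dist.size = 400001) {y : Int} (hy : inR y)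
    (v : Int) (x : Int) (hx : inR x) :
    dval (dist.setIfInBounds (pyIdxA y) v) x = if x = y then v else dval dist x := by
  unfold dval
  rw [getD_set _ _ _ _ (by rw [hsz]; exact pyIdxA_lt hx.1 hx.2)]
  by_cases hxy : x = y
  · subst hxy; simp
  · rw [if_neg (fun h => hxy (pyIdxA_inj hx hy (h.symm))), if_neg hxy]

theorem ZC_le (dist : Array Int) : ZC dist ≤ 400001 := by
  calc ZC dist ≤ (Finset.range 400001).card := Finset.card_filter_le _ _
    _ = 400001 := Finset.card_range _

theorem ZC_set {dist : Array Int} (hsz : dist.size = 400001) {y : Int} (hy : inR y)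
    {v : Int} (hv : v ≠ 0) (hz : dval dist y = 0) :
    ZC (dist.setIfInBounds (pyIdxA y) v) + 1 = ZC dist := by
  unfold ZC
  have hidx : pyIdxA y < 400001 := pyIdxA_lt hy.1 hy.2
  have hfe : (Finset.range 400001).filter
        (fun i => (dist.setIfInBounds (pyIdxA y) v).getD i 0 = 0)
      = ((Finset.range 400001).filter (fun i => dist.getD i 0 = 0)).erase (pyIdxA y) := by
    ext i
    simp only [Finset.mem_filter, Finset.mem_erase, Finset.mem_range]
    constructor
    · rintro ⟨hi, hval⟩
      rw [getD_set _ _ _ _ (by omega)] at hval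
      by_cases hiy : pyIdxA y = i
      · rw [if_pos hiy] at hval; exact absurd hval hv
      · rw [if_neg hiy] at hval; exact ⟨fun h => hiy h.symm, hi, hval⟩
    · rintro ⟨hne, hi, hval⟩
      refine ⟨hi, ?_⟩
      rw [getD_set _ _ _ _ (by omega), if_neg (fun h => hne h.symm)]
      exact hval
  rw [hfe, Finset.card_erase_of_mem]
  · have hpos : 0 < ((Finset.range 400001).filter (fun i => dist.getD i 0 = 0)).card := by
      refine Finset.card_pos.mpr ⟨pyIdxA y, ?_⟩
      refine Finset.mem_filter.mpr ⟨Finset.mem_range.mpr hidx, ?_⟩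
      unfold dval at hz; exact hz
    omega
  · refine Finset.mem_filter.mpr ⟨Finset.mem_range.mpr hidx, ?_⟩
    unfold dval at hz; exact hz

theorem getNextNode_cases (cur m : Int) :
    getNextNode cur m = cur - 1 ∨ getNextNode cur m = cur + 1 ∨ getNextNode cur m = 2 * cur := by
  unfold getNextNode
  split_ifs
  · exact Or.inl rfl
  · exact Or.inr (Or.inl rfl)
  · exact Or.inr (Or.inr (by ring))

theorem nbr_of_next {cur : Int} {m : Int} (h : inR (getNextNode cur m)) :
    nbr cur (getNextNode cur m) := by
  exact ⟨by simpa [mul_comm] using getNextNode_cases cur m, h.1, h.2⟩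

theorem nbr_to_mode {cur y : Int} (h : nbr cur y) :
    ∃ m ∈ ([0, 1, 2] : List Int), getNextNode cur m = y := by
  rcases h.1 with h1 | h1 | h1
  · exact ⟨0, by norm_num, by simp [getNextNode, h1]⟩
  · exact ⟨1, by norm_num, by simp [getNextNode, h1]⟩
  · exact ⟨2, by norm_num, by simp [getNextNode]; omega⟩

-- the marking/queueing state during one `for mode in range(3)` pass
def Mid (src : Int) (ℓ : Nat) (dist : Array Int) (back : List Int) : Prop :=
  dist.size = 400001 ∧
  (∀ x, inR x → (dval dist x ≠ 0 ↔ sp src x ≤ ℓ ∨ x ∈ back)) ∧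
  (∀ x, inR x → dval dist x ≠ 0 → dval dist x = (sp src x : Int) + 1) ∧
  (∀ x ∈ back, inR x ∧ sp src x = ℓ + 1)

theorem modes_spec {src dst cur : Int} {ℓ : Nat} (hsR : inR src) (hdR : inR dst)
    (hcur : inR cur) (hcℓ : sp src cur = ℓ) :
    ∀ (ms : List Int) (dist : Array Int) (back : List Int),
      Mid src ℓ dist back → dval dist cur = (ℓ : Int) + 1 →
      (match bfsModes dst cur ms (dist, back) with
       | .error r => r = (sp src dst : Int) + 1
       | .ok (dist', back') =>
          Mid src ℓ dist' back' ∧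
          (∀ x ∈ back, x ∈ back') ∧
          (∀ m ∈ ms, inR (getNextNode cur m) → dval dist' (getNextNode cur m) ≠ 0) ∧
          (∀ m ∈ ms, getNextNode cur m ≠ dst) ∧
          2 * ZC dist' + back'.length ≤ 2 * ZC dist + back.length ∧
          dval dist' cur = (ℓ : Int) + 1) := by
  intro ms
  induction ms with
  | nil =>
    intro dist back hMid hcd
    simp only [bfsModes]
    exact ⟨hMid, fun x hx => hx, by simp, by simp, le_rfl, hcd⟩
  | cons m ms ih =>
    intro dist back hMid hcd
    obtain ⟨hsz, h2, h3, hb⟩ := hMid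
    simp only [bfsModes]
    by_cases hRm : 0 ≤ getNextNode cur m ∧ getNextNode cur m ≤ 400000
    case neg =>
      rw [if_pos (by simpa using hRm)]
      have H := ih dist back ⟨hsz, h2, h3, hb⟩ hcd
      rcases hres : bfsModes dst cur ms (dist, back) with r | ⟨dist', back'⟩ <;>
        rw [hres] at H
      · exact H
      · obtain ⟨hMid', hsub, hmark, hnd, hmeas, hcd'⟩ := H
        refine ⟨hMid', hsub, ?_, ?_, hmeas, hcd'⟩
        · intro m' hm' hin
          rcases List.mem_cons.mp hm' with rfl | hm'
          · exact absurd ⟨hin.1, hin.2⟩ hRm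
          · exact hmark m' hm' hin
        · intro m' hm'
          rcases List.mem_cons.mp hm' with rfl | hm'
          · intro heq; rw [heq] at hRm; exact hRm ⟨hdR.1, hdR.2⟩
          · exact hnd m' hm'
    case pos =>
      rw [if_neg (by simpa using hRm)]
      have hnext : inR (getNextNode cur m) := ⟨hRm.1, hRm.2⟩
      have hedge : nbr cur (getNextNode cur m) := nbr_of_next hnext
      simp only [beq_iff_eq]
      by_cases hmk : dval dist (getNextNode cur m) = 0
      case pos =>
        -- fresh cell: it gets marked and queued
        have hspn : sp src (getNextNode cur m) = ℓ + 1 := by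
          have hnot : ¬ (sp src (getNextNode cur m) ≤ ℓ ∨ getNextNode cur m ∈ back) := by
            intro hor
            exact (((h2 _ hnext).mpr hor)) hmk
          have hle : sp src (getNextNode cur m) ≤ sp src cur + 1 :=
            sp_edge (reach hsR hcur) hedge
          rw [hcℓ] at hle
          omega
        have hcurne : cur ≠ getNextNode cur m := by
          intro he; rw [← he] at hmk; rw [hmk] at hcd; omega
        rw [if_pos (show dist.getD (pyIdxA (getNextNode cur m)) 0 = 0 from hmk)]
        set dist₁ := dist.setIfInBounds (pyIdxA (getNextNode cur m))
            (dist.getD (pyIdxA cur) 0 + 1) with hdist₁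
        have hv : dist.getD (pyIdxA cur) 0 + 1 = (ℓ : Int) + 2 := by
          have : dval dist cur = (ℓ : Int) + 1 := hcd
          unfold dval at this; omega
        have hsz₁ : dist₁.size = 400001 := by
          rw [hdist₁, Array.size_setIfInBounds, hsz]
        have hdv₁ : ∀ x, inR x → dval dist₁ x =
            if x = getNextNode cur m then (ℓ : Int) + 2 else dval dist x := by
          intro x hx
          rw [hdist₁, hv, dval_set hsz hnext _ x hx]
        have hdn₁ : dval dist₁ (getNextNode cur m) = (ℓ : Int) + 2 := by
          rw [hdv₁ _ hnext, if_pos rfl]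
        have hcd₁ : dval dist₁ cur = (ℓ : Int) + 1 := by
          rw [hdv₁ _ hcur, if_neg hcurne]; exact hcd
        have hMid₁ : Mid src ℓ dist₁ (getNextNode cur m :: back) := by
          refine ⟨hsz₁, ?_, ?_, ?_⟩
          · intro x hx
            rw [hdv₁ _ hx]
            by_cases hxn : x = getNextNode cur m
            · subst hxn
              rw [if_pos rfl]
              constructor
              · intro _; exact Or.inr (List.mem_cons_self)
              · intro _; omega
            · rw [if_neg hxn]
              rw [h2 x hx]
              constructor
              · rintro (h | h)
                · exact Or.inl h
                · exact Or.inr (List.mem_cons_of_mem _ h)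
              · rintro (h | h)
                · exact Or.inl h
                · rcases List.mem_cons.mp h with h' | h'
                  · exact absurd h' hxn
                  · exact Or.inr h'
          · intro x hx hne
            rw [hdv₁ _ hx] at hne ⊢
            by_cases hxn : x = getNextNode cur m
            · subst hxn; rw [if_pos rfl]; rw [hspn]; push_cast; ring
            · rw [if_neg hxn] at hne ⊢; exact h3 x hx hne
          · intro x hx
            rcases List.mem_cons.mp hx with rfl | hx
            · exact ⟨hnext, hspn⟩
            · exact hb x hx
        by_cases hdst : getNextNode cur m = dst
        · rw [if_pos hdst]
          show (dist₁.getD (pyIdxA (getNextNode cur m)) 0) = (sp src dst : Int) + 1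
          have : dval dist₁ (getNextNode cur m) = (ℓ : Int) + 2 := hdn₁
          unfold dval at this
          rw [this, ← hdst, hspn]
          push_cast; ring
        · rw [if_neg hdst]
          have hZC : ZC dist₁ + 1 = ZC dist := by
            rw [hdist₁, hv]
            exact ZC_set hsz hnext (by omega) hmk
          have H := ih dist₁ (getNextNode cur m :: back) hMid₁ hcd₁
          rcases hres : bfsModes dst cur ms (dist₁, getNextNode cur m :: back)
            with r | ⟨dist', back'⟩ <;> rw [hres] at H
          · exact H
          · obtain ⟨hMid', hsub, hmark, hnd, hmeas, hcd'⟩ := H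
            refine ⟨hMid', ?_, ?_, ?_, ?_, hcd'⟩
            · intro x hx; exact hsub x (List.mem_cons_of_mem _ hx)
            · intro m' hm' hin
              rcases List.mem_cons.mp hm' with rfl | hm'
              · -- the freshly marked cell stays marked
                intro hz
                have := (hMid'.2.1 _ hin).mpr
                  (Or.inr (hsub _ List.mem_cons_self))
                exact this hz
              · exact hmark m' hm' hin
            · intro m' hm'
              rcases List.mem_cons.mp hm' with rfl | hm'
              · exact hdst
              · exact hnd m' hm'
            · simp only [List.length_cons] at hmeas
              omega
      case neg =>
        rw [if_neg (show ¬ dist.getD (pyIdxA (getNextNode cur m)) 0 = 0 from hmk)]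
        have hmarked : sp src (getNextNode cur m) ≤ ℓ ∨ getNextNode cur m ∈ back :=
          (h2 _ hnext).mp hmk
        by_cases hdst : getNextNode cur m = dst
        · rw [if_pos hdst]
          show (dist.getD (pyIdxA (getNextNode cur m)) 0) = (sp src dst : Int) + 1
          have := h3 _ hnext hmk
          unfold dval at this
          rw [this, hdst]
        · rw [if_neg hdst]
          have H := ih dist back ⟨hsz, h2, h3, hb⟩ hcd
          rcases hres : bfsModes dst cur ms (dist, back) with r | ⟨dist', back'⟩ <;>
            rw [hres] at H
          · exact H
          · obtain ⟨hMid', hsub, hmark, hnd, hmeas, hcd'⟩ := H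
            refine ⟨hMid', hsub, ?_, ?_, hmeas, hcd'⟩
            · intro m' hm' hin
              rcases List.mem_cons.mp hm' with rfl | hm'
              · intro hz
                refine ((hMid'.2.1 _ hin).mpr ?_) hz
                rcases hmarked with h | h
                · exact Or.inl h
                · exact Or.inr (hsub _ h)
              · exact hmark m' hm' hin
            · intro m' hm'
              rcases List.mem_cons.mp hm' with rfl | hm'
              · exact hdst
              · exact hnd m' hm'


-- the BFS queue invariant (front = current level, back = collected next level, reversed)
def InvQ (src dst : Int) (ℓ : Nat) (dist : Array Int) (front back : List Int) : Prop :=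
  Mid src ℓ dist back ∧
  (∀ x ∈ front, inR x ∧ sp src x = ℓ) ∧
  (∀ x, inR x → dval dist x ≠ 0 → x ∉ front → x ∉ back → ¬ nbr x dst) ∧
  (∀ y, inR y → sp src y = ℓ + 1 → y ∉ back → ∃ x ∈ front, nbr x y)

theorem step_cons {src dst : Int} (hsR : inR src) (hdR : inR dst) {fuel : Nat}
    (ih : ∀ (dist : Array Int) (front back : List Int) (ℓ : Nat),
      InvQ src dst ℓ dist front back →
      2 * ZC dist + front.length + back.length < fuel →
      bfsLoop dst fuel dist front back = some ((sp src dst : Int) + 1)) :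
    ∀ (dist : Array Int) (cur : Int) (f back : List Int) (ℓ : Nat),
      InvQ src dst ℓ dist (cur :: f) back →
      2 * ZC dist + (cur :: f).length + back.length < fuel + 1 →
      bfsLoop dst (fuel + 1) dist (cur :: f) back = some ((sp src dst : Int) + 1) := by
  intro dist cur f back ℓ hInv hfuel
  obtain ⟨hMid, hfr, h6, h4⟩ := hInv
  have hcur : inR cur := (hfr cur List.mem_cons_self).1
  have hcℓ : sp src cur = ℓ := (hfr cur List.mem_cons_self).2
  have hcd : dval dist cur = (ℓ : Int) + 1 := by
    have hm : dval dist cur ≠ 0 := (hMid.2.1 cur hcur).mpr (Or.inl (le_of_eq hcℓ))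
    have := hMid.2.2.1 cur hcur hm
    rw [hcℓ] at this; exact this
  have H := modes_spec hsR hdR hcur hcℓ [0, 1, 2] dist back hMid hcd
  simp only [bfsLoop]
  rcases hres : bfsModes dst cur [0, 1, 2] (dist, back) with r | ⟨dist', back'⟩ <;>
    rw [hres] at H
  · rw [H]
  · obtain ⟨hMid', hsub, hmark, hnd, hmeas, hcd'⟩ := H
    refine ih dist' f back' ℓ ⟨hMid', ?_, ?_, ?_⟩ ?_
    · exact fun x hx => hfr x (List.mem_cons_of_mem _ hx)
    · -- processed cells are not adjacent to dst
      intro x hx hxm hxf hxb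
      by_cases hxc : x = cur
      · subst hxc
        intro hn
        obtain ⟨mm, hmm, hmv⟩ := nbr_to_mode hn
        exact hnd mm hmm hmv
      · have hxold : dval dist x ≠ 0 := by
          have := (hMid'.2.1 x hx).mp hxm
          rcases this with h | h
          · exact (hMid.2.1 x hx).mpr (Or.inl h)
          · exact absurd h hxb
        refine h6 x hx hxold ?_ ?_
        · intro hm; rcases List.mem_cons.mp hm with h | h
          · exact hxc h
          · exact hxf h
        · intro hm; exact hxb (hsub x hm)
    · -- every unseen next-level cell still has a predecessor in the front
      intro y hy hsp hyb
      obtain ⟨x, hxm, hxn⟩ := h4 y hy hsp (fun hm => hyb (hsub y hm))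
      rcases List.mem_cons.mp hxm with rfl | hxf
      · exfalso
        obtain ⟨mm, hmm, hmv⟩ := nbr_to_mode hxn
        have hym : dval dist' y ≠ 0 := by
          rw [← hmv]
          exact hmark mm hmm (by rw [hmv]; exact hy)
        rcases (hMid'.2.1 y hy).mp hym with h | h
        · omega
        · exact hyb h
      · exact ⟨x, hxf, hxn⟩
    · simp only [List.length_cons] at hfuel ⊢
      omega

theorem loop_pop (dst : Int) (fuel : Nat) (dist : Array Int) (c : Int) (bs : List Int) :
    bfsLoop dst (fuel + 1) dist [] (c :: bs) =
      bfsLoop dst (fuel + 1) dist ((c :: bs).reverse) [] := by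
  have hne : (c :: bs).reverse ≠ [] := by simp
  rcases hrev : (c :: bs).reverse with _ | ⟨cur, f⟩
  · exact absurd hrev hne
  · simp only [bfsLoop, hrev]

theorem loop_correct {src dst : Int} (hsR : inR src) (hdR : inR dst) :
    ∀ (fuel : Nat) (dist : Array Int) (front back : List Int) (ℓ : Nat),
      InvQ src dst ℓ dist front back →
      2 * ZC dist + front.length + back.length < fuel →
      bfsLoop dst fuel dist front back = some ((sp src dst : Int) + 1) := by
  intro fuel
  induction fuel with
  | zero => intro _ _ _ _ _ hlt; omega
  | succ fuel ih =>
    intro dist front back ℓ hInv hfuel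
    rcases front with _ | ⟨cur, f⟩
    · rcases hback : back with _ | ⟨c, bs⟩
      · -- empty queue: impossible, some neighbour of dst is processed but unreturned
        exfalso
        subst hback
        obtain ⟨hMid, hfr, h6, h4⟩ := hInv
        have hnolevel : ∀ y, inR y → sp src y ≠ ℓ + 1 := by
          intro y hy hsp
          obtain ⟨x, hx, _⟩ := h4 y hy hsp (List.not_mem_nil)
          exact List.not_mem_nil hx
        have hall : ∀ x, inR x → sp src x ≤ ℓ := by
          intro x hx
          by_contra hgt
          obtain ⟨z, hz, hzsp⟩ := level_down hsR (sp src x - (ℓ + 1)) (ℓ + 1)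
            (by omega) ⟨x, hx, by omega⟩
          exact hnolevel z hz hzsp
        obtain ⟨hd0, hd4⟩ := hdR
        set w : Int := if dst ≤ 399999 then dst + 1 else dst - 1 with hw
        have hwR : inR w := by
          rw [hw]; split_ifs <;> constructor <;> omega
        have hwn : nbr w dst := by
          rw [hw]; split_ifs with hcase
          · exact ⟨Or.inl (by omega), hd0, hd4⟩
          · exact ⟨Or.inr (Or.inl (by omega)), hd0, hd4⟩
        have hwm : dval dist w ≠ 0 := (hMid.2.1 w hwR).mpr (Or.inl (hall w hwR))
        exact h6 w hwR hwm (List.not_mem_nil) (List.not_mem_nil) hwn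
      · -- roll the deque over to the next level
        subst hback
        rw [loop_pop]
        obtain ⟨hMid, hfr, h6, h4⟩ := hInv
        obtain ⟨hsz, h2, h3, hb⟩ := hMid
        have hballin : ∀ y, inR y → sp src y = ℓ + 1 → y ∈ (c :: bs) := by
          intro y hy hsp
          by_contra hyb
          obtain ⟨x, hx, _⟩ := h4 y hy hsp hyb
          exact List.not_mem_nil hx
        have hInv' : InvQ src dst (ℓ + 1) dist ((c :: bs).reverse) [] := by
          refine ⟨⟨hsz, ?_, h3, by simp⟩, ?_, ?_, ?_⟩
          · intro x hx
            rw [h2 x hx]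
            constructor
            · rintro (h | h)
              · exact Or.inl (by omega)
              · exact Or.inl (le_of_eq (hb x h).2)
            · rintro (h | h)
              · rcases Nat.lt_or_ge (sp src x) (ℓ + 1) with h' | h'
                · exact Or.inl (by omega)
                · exact Or.inr (hballin x hx (by omega))
              · exact absurd h (List.not_mem_nil)
          · intro x hx
            rw [List.mem_reverse] at hx
            exact hb x hx
          · intro x hx hxm hxf hxb
            refine h6 x hx hxm (List.not_mem_nil) ?_
            rw [← List.mem_reverse]
            exact hxf
          · intro y hy hsp hyb
            obtain ⟨z, hzn, hzsp, hzor⟩ := penult (reach hsR hy) hsp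
            have hzR : inR z := by
              rcases hzor with rfl | h
              · rw [sp_self] at hzsp; omega
              · exact h
            refine ⟨z, ?_, hzn⟩
            rw [List.mem_reverse]
            exact hballin z hzR hzsp
        rcases hrev : (c :: bs).reverse with _ | ⟨cur, f⟩
        · exact absurd hrev (by simp)
        · rw [← hrev]  -- keep the reverse form
          rw [hrev]
          refine step_cons hsR hdR ih dist cur f [] (ℓ + 1) (by rw [← hrev]; exact hInv') ?_
          have hlen : (cur :: f).length = (c :: bs).length := by
            rw [← hrev, List.length_reverse]
          simp only [List.length_cons, List.length_nil] at hfuel hlen ⊢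
          omega
    · exact step_cons hsR hdR ih dist cur f back ℓ hInv hfuel


-- ---- initial state and the three off-board regimes ----

theorem init_dval {src : Int} (hsR : inR src) (x : Int) (hx : inR x) :
    dval ((Array.replicate 400001 (0:Int)).setIfInBounds (pyIdxA src) 1) x
      = if x = src then 1 else 0 := by
  rw [dval_set (by simp) hsR 1 x hx]
  by_cases hxy : x = src
  · simp [hxy]
  · rw [if_neg hxy, if_neg hxy]
    unfold dval
    simp [Array.getD, pyIdxA_lt hx.1 hx.2]

theorem ZC_replicate : ZC (Array.replicate 400001 (0:Int)) = 400001 := by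
  unfold ZC
  rw [Finset.filter_true_of_mem, Finset.card_range]
  intro i hi
  simp [Array.getD, Finset.mem_range.mp hi]

theorem ZC_init {src : Int} (hsR : inR src) :
    ZC ((Array.replicate 400001 (0:Int)).setIfInBounds (pyIdxA src) 1) = 400000 := by
  have h := ZC_set (dist := Array.replicate 400001 (0:Int)) (by simp) hsR
    (v := 1) (by norm_num) (by
      unfold dval
      simp [Array.getD, pyIdxA_lt hsR.1 hsR.2])
  rw [ZC_replicate] at h
  omega

theorem sp_zero_iff {src x : Int} (hsR : inR src) (hx : inR x) :
    sp src x = 0 ↔ x = src := by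
  constructor
  · exact sp_eq_zero (reach hsR hx)
  · rintro rfl; exact sp_self _

theorem bfs_inR {src dst : Int} (hsR : inR src) (hdR : inR dst) :
    bfs src dst = some ((sp src dst : Int) + 1) := by
  simp only [bfs]
  refine loop_correct hsR hdR 800005 _ [src] [] 0 ⟨⟨by simp, ?_, ?_, by simp⟩, ?_, ?_, ?_⟩ ?_
  · intro x hx
    rw [init_dval hsR x hx]
    by_cases hxy : x = src
    · subst hxy; simp [sp_self]
    · simp only [if_neg hxy, List.not_mem_nil, or_false]
      constructor
      · intro h; exact absurd rfl h
      · intro h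
        exact absurd ((sp_zero_iff hsR hx).mp (by omega)) hxy
  · intro x hx hne
    rw [init_dval hsR x hx] at hne ⊢
    by_cases hxy : x = src
    · subst hxy
      rw [if_pos rfl, sp_self]
      norm_num
    · rw [if_neg hxy] at hne; exact absurd rfl hne
  · intro x hx
    rcases List.mem_cons.mp hx with rfl | hx
    · exact ⟨hsR, sp_self _⟩
    · exact absurd hx (List.not_mem_nil)
  · intro x hx hxm hxf _
    exfalso
    rw [init_dval hsR x hx] at hxm
    by_cases hxy : x = src
    · exact hxf (by rw [hxy]; exact List.mem_cons_self)
    · rw [if_neg hxy] at hxm; exact hxm rfl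
  · intro y hy hsp _
    obtain ⟨z, hzn, hzsp, hzor⟩ := penult (reach hsR hy) hsp
    have hzsrc : z = src := by
      rcases hzor with rfl | hz
      · rfl
      · exact (sp_zero_iff hsR hz).mp hzsp
    subst hzsrc
    exact ⟨z, List.mem_cons_self, hzn⟩
  · rw [ZC_init hsR]
    norm_num

theorem modes_ok {dst : Int} (hdst : ¬ (0 ≤ dst ∧ dst ≤ 400000)) (cur : Int) :
    ∀ (ms : List Int) (st : Array Int × List Int),
      ∃ st', bfsModes dst cur ms st = .ok st' := by
  intro ms
  induction ms with
  | nil => intro st; exact ⟨st, rfl⟩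
  | cons m ms ih =>
    rintro ⟨dist, back⟩
    simp only [bfsModes]
    by_cases hRm : 0 ≤ getNextNode cur m ∧ getNextNode cur m ≤ 400000
    · rw [if_neg (by simpa using hRm)]
      have hne : getNextNode cur m ≠ dst := by
        intro h; rw [h] at hRm; exact hdst hRm
      simp only [beq_iff_eq]
      rw [if_neg hne]
      exact ih _
    · rw [if_pos (by simpa using hRm)]
      exact ih _

theorem loop_none {dst : Int} (hdst : ¬ (0 ≤ dst ∧ dst ≤ 400000)) :
    ∀ (fuel : Nat) (dist : Array Int) (front back : List Int),
      bfsLoop dst fuel dist front back = none := by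
  intro fuel
  induction fuel with
  | zero => intro _ _ _; rfl
  | succ fuel ih =>
    intro dist front back
    rcases front with _ | ⟨cur, f⟩
    · rcases hrev : back.reverse with _ | ⟨cur, f⟩
      · simp only [bfsLoop, hrev]
      · simp only [bfsLoop, hrev]
        obtain ⟨⟨dist', b'⟩, hok⟩ := modes_ok hdst cur [0,1,2] (dist, [])
        rw [hok]
        exact ih _ _ _
    · simp only [bfsLoop]
      obtain ⟨⟨dist', b'⟩, hok⟩ := modes_ok hdst cur [0,1,2] (dist, back)
      rw [hok]
      exact ih _ _ _

theorem bfs_none_dst {src dst : Int} (hdst : ¬ (0 ≤ dst ∧ dst ≤ 400000)) :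
    bfs src dst = none :=
  loop_none hdst 800005 _ [src] []

theorem loop_nil (dst : Int) (fuel : Nat) (dist : Array Int) :
    bfsLoop dst fuel dist [] [] = none := by
  cases fuel with
  | zero => rfl
  | succ fuel => simp only [bfsLoop, List.reverse_nil]

theorem bfs_neg {src : Int} (h2 : src ≤ -2) (dst : Int) : bfs src dst = none := by
  have hm0 : getNextNode src 0 = src - 1 := by norm_num [getNextNode]
  have hm1 : getNextNode src 1 = src + 1 := by norm_num [getNextNode]
  have hm2 : getNextNode src 2 = src * 2 := by norm_num [getNextNode]
  have hA : ∀ dist : Array Int, bfsModes dst src [0, 1, 2] (dist, []) = .ok (dist, []) := by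
    intro dist
    simp only [bfsModes, hm0, hm1, hm2]
    rw [if_pos (show ¬ (0 ≤ src - 1 ∧ src - 1 ≤ 400000) by omega),
        if_pos (show ¬ (0 ≤ src + 1 ∧ src + 1 ≤ 400000) by omega),
        if_pos (show ¬ (0 ≤ src * 2 ∧ src * 2 ≤ 400000) by omega)]
  have key : ∀ (fuel : Nat) (dist : Array Int),
      bfsLoop dst (fuel + 1) dist [src] [] = none := by
    intro fuel dist
    simp only [bfsLoop, hA]
    exact loop_nil dst fuel dist
  exact key 800004 _


-- ---- liveness inside D_: from src = -1 the BFS always returns a value ----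

theorem getD_oob (a : Array Int) (j : Nat) (h : a.size ≤ j) : a.getD j 0 = 0 := by
  simp [Array.getD, Nat.not_lt.mpr h]

theorem nonneg_set {a : Array Int} (ha : ∀ i, 0 ≤ a.getD i 0) {v : Int} (hv : 0 ≤ v)
    (j : Nat) : ∀ i, 0 ≤ (a.setIfInBounds j v).getD i 0 := by
  intro i
  by_cases hi : i < a.size
  · rw [getD_set _ _ _ _ hi]
    by_cases hji : j = i
    · rw [if_pos hji]; exact hv
    · rw [if_neg hji]; exact ha i
  · rw [getD_oob _ _ (by rw [Array.size_setIfInBounds]; omega)]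

theorem modes_live {dst cur : Int} (hdR : inR dst) :
    ∀ (ms : List Int) (dist : Array Int) (back : List Int),
      dist.size = 400001 → (∀ i, 0 ≤ dist.getD i 0) →
      (match bfsModes dst cur ms (dist, back) with
       | .error _ => True
       | .ok (dist', back') =>
          dist'.size = 400001 ∧ (∀ i, 0 ≤ dist'.getD i 0) ∧
          (∀ x, inR x → dval dist x ≠ 0 → dval dist' x ≠ 0) ∧
          (∀ x ∈ back, x ∈ back') ∧
          (∀ x, inR x → dval dist' x ≠ 0 → dval dist x ≠ 0 ∨ x ∈ back') ∧
          (∀ m ∈ ms, inR (getNextNode cur m) → dval dist' (getNextNode cur m) ≠ 0) ∧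
          (∀ m ∈ ms, getNextNode cur m ≠ dst) ∧
          2 * ZC dist' + back'.length ≤ 2 * ZC dist + back.length) := by
  intro ms
  induction ms with
  | nil =>
    intro dist back hsz hnn
    simp only [bfsModes]
    exact ⟨hsz, hnn, fun _ _ h => h, fun x hx => hx, fun x _ h => Or.inl h,
      by simp, by simp, le_rfl⟩
  | cons m ms ih =>
    intro dist back hsz hnn
    simp only [bfsModes]
    by_cases hRm : 0 ≤ getNextNode cur m ∧ getNextNode cur m ≤ 400000
    case neg =>
      rw [if_pos (by simpa using hRm)]
      have H := ih dist back hsz hnn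
      rcases hres : bfsModes dst cur ms (dist, back) with r | ⟨dist', back'⟩ <;>
        rw [hres] at H
      · trivial
      · obtain ⟨h1, h2, h3, h4, h5, h6, h7, h8⟩ := H
        refine ⟨h1, h2, h3, h4, h5, ?_, ?_, h8⟩
        · intro m' hm' hin
          rcases List.mem_cons.mp hm' with rfl | hm'
          · exact absurd ⟨hin.1, hin.2⟩ hRm
          · exact h6 m' hm' hin
        · intro m' hm'
          rcases List.mem_cons.mp hm' with rfl | hm'
          · intro he; rw [he] at hRm; exact hRm ⟨hdR.1, hdR.2⟩
          · exact h7 m' hm'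
    case pos =>
      rw [if_neg (by simpa using hRm)]
      have hnext : inR (getNextNode cur m) := ⟨hRm.1, hRm.2⟩
      simp only [beq_iff_eq]
      by_cases hmk : dval dist (getNextNode cur m) = 0
      case pos =>
        rw [if_pos (show dist.getD (pyIdxA (getNextNode cur m)) 0 = 0 from hmk)]
        by_cases hdst : getNextNode cur m = dst
        · rw [if_pos hdst]; trivial
        · rw [if_neg hdst]
          have hv1 : (1:Int) ≤ dist.getD (pyIdxA cur) 0 + 1 := by have := hnn (pyIdxA cur); omega
          have hsz₁ : (dist.setIfInBounds (pyIdxA (getNextNode cur m))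
              (dist.getD (pyIdxA cur) 0 + 1)).size = 400001 := by
            rw [Array.size_setIfInBounds, hsz]
          have hnn₁ := nonneg_set hnn (show (0:Int) ≤ dist.getD (pyIdxA cur) 0 + 1 by omega) (pyIdxA (getNextNode cur m))
          have hdv₁ : ∀ x, inR x → dval (dist.setIfInBounds (pyIdxA (getNextNode cur m))
              (dist.getD (pyIdxA cur) 0 + 1)) x =
              if x = getNextNode cur m then dist.getD (pyIdxA cur) 0 + 1 else dval dist x :=
            fun x hx => dval_set hsz hnext _ x hx
          have H := ih (dist.setIfInBounds (pyIdxA (getNextNode cur m))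
              (dist.getD (pyIdxA cur) 0 + 1)) (getNextNode cur m :: back) hsz₁ hnn₁
          rcases hres : bfsModes dst cur ms (dist.setIfInBounds (pyIdxA (getNextNode cur m))
              (dist.getD (pyIdxA cur) 0 + 1), getNextNode cur m :: back)
            with r | ⟨dist', back'⟩ <;> rw [hres] at H
          · trivial
          · obtain ⟨h1, h2, h3, h4, h5, h6, h7, h8⟩ := H
            have hgrow : ∀ x, inR x → dval dist x ≠ 0 → dval dist' x ≠ 0 := by
              intro x hx hxm
              refine h3 x hx ?_
              rw [hdv₁ x hx]
              by_cases hxn : x = getNextNode cur m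
              · subst hxn; exact absurd hmk hxm
              · rw [if_neg hxn]; exact hxm
            have hZC : ZC (dist.setIfInBounds (pyIdxA (getNextNode cur m))
                (dist.getD (pyIdxA cur) 0 + 1)) + 1 = ZC dist :=
              by refine ZC_set hsz hnext ?_ hmk; omega
            refine ⟨h1, h2, hgrow, ?_, ?_, ?_, ?_, ?_⟩
            · intro x hx; exact h4 x (List.mem_cons_of_mem _ hx)
            · intro x hx hxm
              rcases h5 x hx hxm with h | h
              · rw [hdv₁ x hx] at h
                by_cases hxn : x = getNextNode cur m
                · subst hxn
                  exact Or.inr (h4 _ List.mem_cons_self)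
                · rw [if_neg hxn] at h; exact Or.inl h
              · exact Or.inr h
            · intro m' hm' hin
              rcases List.mem_cons.mp hm' with rfl | hm'
              · refine h3 _ hin ?_
                rw [hdv₁ _ hin, if_pos rfl]
                omega
              · exact h6 m' hm' hin
            · intro m' hm'
              rcases List.mem_cons.mp hm' with rfl | hm'
              · exact hdst
              · exact h7 m' hm'
            · simp only [List.length_cons] at h8
              omega
      case neg =>
        rw [if_neg (show ¬ dist.getD (pyIdxA (getNextNode cur m)) 0 = 0 from hmk)]
        by_cases hdst : getNextNode cur m = dst
        · rw [if_pos hdst]; trivial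
        · rw [if_neg hdst]
          have H := ih dist back hsz hnn
          rcases hres : bfsModes dst cur ms (dist, back) with r | ⟨dist', back'⟩ <;>
            rw [hres] at H
          · trivial
          · obtain ⟨h1, h2, h3, h4, h5, h6, h7, h8⟩ := H
            refine ⟨h1, h2, h3, h4, h5, ?_, ?_, h8⟩
            · intro m' hm' hin
              rcases List.mem_cons.mp hm' with rfl | hm'
              · exact h3 _ hin hmk
              · exact h6 m' hm' hin
            · intro m' hm'
              rcases List.mem_cons.mp hm' with rfl | hm'
              · exact hdst
              · exact h7 m' hm'


-- liveness invariant: every marked on-board cell other than the stray pre-mark at 400000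
-- is queued, or fully expanded and not adjacent to dst
def WInv (dst : Int) (dist : Array Int) (front back : List Int) : Prop :=
  dist.size = 400001 ∧ (∀ i, 0 ≤ dist.getD i 0) ∧ dval dist 0 ≠ 0 ∧
  (∀ x, inR x → x ≠ 400000 → dval dist x ≠ 0 → x ∉ front → x ∉ back →
      (∀ y, nbr x y → dval dist y ≠ 0) ∧ ¬ nbr x dst)

theorem wstep {dst : Int} (hdR : inR dst) {fuel : Nat}
    (ih : ∀ (dist : Array Int) (front back : List Int), WInv dst dist front back →
      2 * ZC dist + front.length + back.length < fuel →
      ∃ r, bfsLoop dst fuel dist front back = some r) :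
    ∀ (dist : Array Int) (cur : Int) (f back : List Int),
      WInv dst dist (cur :: f) back →
      2 * ZC dist + (cur :: f).length + back.length < fuel + 1 →
      ∃ r, bfsLoop dst (fuel + 1) dist (cur :: f) back = some r := by
  intro dist cur f back hW hfuel
  obtain ⟨hsz, hnn, h0m, h6⟩ := hW
  have H := modes_live (cur := cur) hdR [0, 1, 2] dist back hsz hnn
  simp only [bfsLoop]
  rcases hres : bfsModes dst cur [0, 1, 2] (dist, back) with r | ⟨dist', back'⟩ <;>
    rw [hres] at H
  · exact ⟨r, rfl⟩
  · obtain ⟨h1, h2, h3, h4, h5, hm6, hm7, h8⟩ := H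
    refine ih dist' f back' ⟨h1, h2, h3 0 ⟨le_rfl, by norm_num⟩ h0m, ?_⟩ ?_
    · intro x hx hxe hxm hxf hxb
      by_cases hxc : x = cur
      · subst hxc
        constructor
        · intro y hy
          obtain ⟨mm, hmm, hmv⟩ := nbr_to_mode hy
          rw [← hmv]
          exact hm6 mm hmm (by rw [hmv]; exact ⟨hy.2.1, hy.2.2⟩)
        · intro hn
          obtain ⟨mm, hmm, hmv⟩ := nbr_to_mode hn
          exact hm7 mm hmm hmv
      · have hxold : dval dist x ≠ 0 := by
          rcases h5 x hx hxm with h | h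
          · exact h
          · exact absurd h hxb
        have hold := h6 x hx hxe hxold
          (by intro hm; rcases List.mem_cons.mp hm with h | h; exact hxc h; exact hxf h)
          (fun hm => hxb (h4 x hm))
        exact ⟨fun y hy => h3 y ⟨hy.2.1, hy.2.2⟩ (hold.1 y hy), hold.2⟩
    · simp only [List.length_cons] at hfuel ⊢
      omega

theorem loop_live {dst : Int} (hdR : inR dst) :
    ∀ (fuel : Nat) (dist : Array Int) (front back : List Int),
      WInv dst dist front back →
      2 * ZC dist + front.length + back.length < fuel →
      ∃ r, bfsLoop dst fuel dist front back = some r := by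
  intro fuel
  induction fuel with
  | zero => intro _ _ _ _ hlt; omega
  | succ fuel ih =>
    intro dist front back hW hfuel
    rcases front with _ | ⟨cur, f⟩
    · rcases hback : back with _ | ⟨c, bs⟩
      · exfalso
        subst hback
        obtain ⟨hsz, hnn, h0m, h6⟩ := hW
        have hclosed : ∀ x, inR x → x ≠ 400000 → dval dist x ≠ 0 →
            ∀ y, nbr x y → dval dist y ≠ 0 := fun x hx hxe hxm =>
          (h6 x hx hxe hxm List.not_mem_nil List.not_mem_nil).1
        have hclimb : ∀ k : Nat, k ≤ 399999 → dval dist (k : Int) ≠ 0 := by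
          intro k
          induction k with
          | zero => intro _; exact h0m
          | succ k ihk =>
            intro hk
            have hkm := ihk (by omega)
            have := hclosed (k : Int) ⟨by positivity, by omega⟩ (by omega) hkm
              ((k : Int) + 1) ⟨Or.inr (Or.inl rfl), by positivity, by omega⟩
            rwa [show ((k + 1 : Nat) : Int) = (k : Int) + 1 by push_cast; ring]
        obtain ⟨hd0, hd4⟩ := hdR
        set w : Int := if dst ≤ 399998 then dst + 1 else dst - 1 with hw
        have hwR : 0 ≤ w ∧ w ≤ 399999 := by rw [hw]; split_ifs <;> omega
        have hwn : nbr w dst := by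
          rw [hw]; split_ifs with hcase
          · exact ⟨Or.inl (by omega), hd0, hd4⟩
          · exact ⟨Or.inr (Or.inl (by omega)), hd0, hd4⟩
        have hwm : dval dist w ≠ 0 := by
          have := hclimb w.toNat (by omega)
          rwa [Int.toNat_of_nonneg hwR.1] at this
        exact (h6 w ⟨hwR.1, by omega⟩ (by omega) hwm List.not_mem_nil
          List.not_mem_nil).2 hwn
      · subst hback
        rw [loop_pop]
        obtain ⟨hsz, hnn, h0m, h6⟩ := hW
        have hW' : WInv dst dist ((c :: bs).reverse) [] := by
          refine ⟨hsz, hnn, h0m, ?_⟩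
          intro x hx hxe hxm hxf _
          exact h6 x hx hxe hxm List.not_mem_nil (fun h => hxf (List.mem_reverse.mpr h))
        rcases hrev : (c :: bs).reverse with _ | ⟨cur, f⟩
        · exact absurd hrev (by simp)
        · rw [hrev] at hW'
          refine wstep hdR ih dist cur f [] hW' ?_
          have hlen : (cur :: f).length = (c :: bs).length := by
            rw [← hrev, List.length_reverse]
          simp only [List.length_cons, List.length_nil] at hfuel hlen ⊢
          omega
    · exact wstep hdR ih dist cur f back hW hfuel

theorem replicate_nonneg : ∀ i, 0 ≤ (Array.replicate 400001 (0:Int)).getD i 0 := by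
  intro i
  by_cases hi : i < 400001
  · simp [Array.getD, hi]
  · rw [getD_oob _ _ (by simp; omega)]

theorem bfs_neg1 {dst : Int} (hdR : inR dst) (hne : dst ≠ 0) :
    ∃ r, bfs (-1) dst = some r := by
  have hi1 : pyIdxA (-1) = 400000 := by
    unfold pyIdxA; rw [if_pos (by norm_num)]; decide
  have hi0 : pyIdxA (0:Int) = 0 := by norm_num [pyIdxA]
  have hi4 : pyIdxA (400000:Int) = 400000 := by
    unfold pyIdxA; rw [if_neg (by norm_num)]; decide
  have hm0 : getNextNode (-1) 0 = -2 := by norm_num [getNextNode]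
  have hm1 : getNextNode (-1) 1 = 0 := by norm_num [getNextNode]
  have hm2 : getNextNode (-1) 2 = -2 := by norm_num [getNextNode]
  obtain ⟨d0, hd0⟩ : ∃ d : Array Int,
      d = (Array.replicate 400001 (0:Int)).setIfInBounds 400000 1 := ⟨_, rfl⟩
  have hsz0 : d0.size = 400001 := by rw [hd0]; simp
  have g0 : d0.getD 0 0 = 0 := by
    rw [hd0, getD_set _ _ _ _ (by simp)]
    rw [if_neg (by norm_num)]
    simp [Array.getD]
  have g4 : d0.getD 400000 0 = 1 := by
    rw [hd0, getD_set _ _ _ _ (by simp)]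
    rw [if_pos rfl]
  have hmodes : bfsModes dst (-1) [0, 1, 2] (d0, []) =
      .ok (d0.setIfInBounds 0 (1 + 1), [0]) := by
    simp only [bfsModes, hm0, hm1, hm2, hi0, hi1, g0, g4, beq_iff_eq]
    rw [if_neg (show ¬ ¬ ((0:Int) ≤ 0 ∧ (0:Int) ≤ 400000) by norm_num)]
    rw [if_neg (show ¬ (0:Int) = dst from fun h => hne h.symm)]
    rw [if_pos (show ¬ ((0:Int) ≤ -2 ∧ (-2:Int) ≤ 400000) by norm_num)]
    rw [if_pos (show ¬ ((0:Int) ≤ -2 ∧ (-2:Int) ≤ 400000) by norm_num)]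
    simp only [if_true]
  obtain ⟨d1, hd1⟩ : ∃ d : Array Int, d = d0.setIfInBounds 0 (1 + 1) := ⟨_, rfl⟩
  have hdv1 : ∀ x, inR x → dval d1 x = if x = 0 then 2 else dval d0 x := by
    intro x hx
    rw [hd1, show (0:Nat) = pyIdxA (0:Int) from hi0.symm]
    rw [dval_set hsz0 ⟨le_rfl, by norm_num⟩ _ x hx]
    norm_num
  have hdv0 : ∀ x, inR x → dval d0 x = if x = 400000 then 1 else 0 := by
    intro x hx
    rw [hd0, show (400000:Nat) = pyIdxA (400000:Int) from hi4.symm]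
    rw [dval_set (by simp) ⟨by norm_num, le_rfl⟩ _ x hx]
    by_cases hx4 : x = 400000
    · rw [if_pos hx4, if_pos hx4]
    · rw [if_neg hx4, if_neg hx4]
      unfold dval
      simp [Array.getD, pyIdxA_lt hx.1 hx.2]
  have hW : WInv dst d1 [] [0] := by
    refine ⟨by rw [hd1, Array.size_setIfInBounds, hsz0], ?_, ?_, ?_⟩
    · rw [hd1]
      refine nonneg_set ?_ (by norm_num) 0
      rw [hd0]
      exact nonneg_set replicate_nonneg (by norm_num) 400000
    · rw [hdv1 0 ⟨le_rfl, by norm_num⟩, if_pos rfl]; norm_num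
    · intro x hx hxe hxm _ hxb
      exfalso
      rw [hdv1 x hx] at hxm
      by_cases hx0 : x = 0
      · exact hxb (by rw [hx0]; exact List.mem_cons_self)
      · rw [if_neg hx0, hdv0 x hx, if_neg hxe] at hxm
        exact hxm rfl
  have hloop : ∃ r, bfsLoop dst 800004 d1 [] [0] = some r := by
    refine loop_live hdR 800004 d1 [] [0] hW ?_
    have := ZC_le d1
    simp only [List.length_nil, List.length_cons]
    omega
  obtain ⟨r, hr⟩ := hloop
  refine ⟨r, ?_⟩
  have hbfs : bfs (-1) dst
      = bfsLoop dst 800005 ((Array.replicate 400001 (0:Int)).setIfInBounds (pyIdxA (-1)) 1) [-1] [] := rfl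
  rw [hbfs, hi1, ← hd0]
  have hstep : ∀ fuel : Nat, bfsLoop dst (fuel + 1) d0 [-1] []
      = bfsLoop dst fuel (d0.setIfInBounds 0 (1+1)) [] [0] := by
    intro fuel
    simp only [bfsLoop, hmodes]
  rw [show (800005:Nat) = 800004 + 1 from rfl, hstep 800004, ← hd1]
  exact hr

-- ===== VERDICT (by name: the statement is the Claim_ definition above) =====
theorem bfs_spec : Claim_unchanged_bfs := by
  intro src dst _ hPre hnd
  obtain ⟨hp1, hp2⟩ := hPre
  unfold D_bfs at hnd
  by_cases hs0 : 0 ≤ src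
  · have hsR : inR src := ⟨hs0, hp2⟩
    by_cases hd : 0 ≤ dst ∧ dst ≤ 400000
    · have hdR : inR dst := ⟨hd.1, hd.2⟩
      rw [bfs_inR hsR hdR]
      unfold bfs_alt
      rw [if_neg (by omega), minMoves_eq_sp hsR hdR]
    · rw [bfs_none_dst hd]
      unfold bfs_alt
      rw [if_pos (by omega)]
  · by_cases hd : 0 ≤ dst ∧ dst ≤ 400000
    · have hs2 : src ≤ -2 := by omega
      rw [bfs_neg hs2 dst]
      unfold bfs_alt
      rw [if_pos (by omega)]
    · rw [bfs_none_dst hd]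
      unfold bfs_alt
      rw [if_pos (by omega)]

theorem bfs_eval_witness : bfs (-1) 0 = some 2 := by
  have hi1 : pyIdxA (-1) = 400000 := by
    unfold pyIdxA; rw [if_pos (by norm_num)]; decide
  have hi0 : pyIdxA (0:Int) = 0 := by norm_num [pyIdxA]
  have hm0 : getNextNode (-1) 0 = -2 := by norm_num [getNextNode]
  have hm1 : getNextNode (-1) 1 = 0 := by norm_num [getNextNode]
  obtain ⟨d0, hd0⟩ : ∃ d : Array Int,
      d = (Array.replicate 400001 (0:Int)).setIfInBounds 400000 1 := ⟨_, rfl⟩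
  have g0 : d0.getD 0 0 = 0 := by
    rw [hd0, getD_set _ _ _ _ (by simp)]
    rw [if_neg (by norm_num)]
    simp [Array.getD]
  have g4 : d0.getD 400000 0 = 1 := by
    rw [hd0, getD_set _ _ _ _ (by simp)]
    rw [if_pos rfl]
  have hmodes : bfsModes 0 (-1) [0, 1, 2] (d0, []) = .error 2 := by
    simp only [bfsModes, hm0, hm1, hi0, hi1, g0, g4, beq_iff_eq]
    simp only [if_true]
    rw [getD_set _ _ _ _ (by simp [hd0])]
    norm_num
  have key : ∀ fuel : Nat, bfsLoop 0 (fuel + 1) d0 [-1] [] = some 2 := by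
    intro fuel
    simp only [bfsLoop, hmodes]
  have hbfs : bfs (-1) 0
      = bfsLoop 0 800005 ((Array.replicate 400001 (0:Int)).setIfInBounds (pyIdxA (-1)) 1) [-1] [] := rfl
  rw [hbfs, hi1, ← hd0]
  exact key 800004

theorem bfs_changed : Claim_changed_bfs := by
  unfold Claim_changed_bfs
  refine ⟨by decide, by decide, by decide, ?_, by decide, by decide⟩
  exact bfs_eval_witness

theorem bfs_tight : Claim_exact_bfs := by
  intro src dst _ _ hD
  unfold D_bfs at hD
  obtain ⟨rfl, hd1, hd2⟩ := hD
  have halt : bfs_alt (-1) dst = none := by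
    unfold bfs_alt
    rw [if_pos (by norm_num)]
  rw [halt]
  by_cases h0 : dst = 0
  · subst h0
    rw [bfs_eval_witness]
    simp
  · obtain ⟨r, hr⟩ := bfs_neg1 ⟨hd1, hd2⟩ h0
    rw [hr]
    simp
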